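-- pv_equiv track=rewrite | github.com/noahostle/SPEAR | Attacks/full_key_recovery/test_state_recovery.py | diff_positions
-- ===== SOURCE A (Python) =====
-- from typing import Dict, List, Optional, Sequence, Tuple
--
-- def diff_positions(sample_x: Sequence[int], diffs: Sequence[int]) -> List[int]:
--     positions = []
--     seen = set()
--     for x in sample_x:
--         if x not in seen:
--             seen.add(x)
--             positions.append(x)
--         for diff in diffs:
--             y = (x + diff) & 0xFFFF
--             if y not in seen:
--                 seen.add(y)
--                 positions.append(y)
--     return positions
-- ===== SOURCE B (Python) =====
-- def diff_positions(sample_x, diffs):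
--     candidates = [v for x in sample_x
--                     for v in [x] + [(x + d) & 0xFFFF for d in diffs]]
--     return sorted(set(candidates), key=candidates.index)
-- ===== Notes on version B (the rewrite author's own statement) =====
-- stated objective: alternative
-- what changed: B never performs a sequential dedup: it builds the flat candidate list, takes its distinct values as a set, and SORTS them by first-occurrence index (candidates.index) to recover A's emission order, replacing A's fused seen-set loop with a generate / set / sort-by-first-index pipeline.
import Mathlib
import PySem

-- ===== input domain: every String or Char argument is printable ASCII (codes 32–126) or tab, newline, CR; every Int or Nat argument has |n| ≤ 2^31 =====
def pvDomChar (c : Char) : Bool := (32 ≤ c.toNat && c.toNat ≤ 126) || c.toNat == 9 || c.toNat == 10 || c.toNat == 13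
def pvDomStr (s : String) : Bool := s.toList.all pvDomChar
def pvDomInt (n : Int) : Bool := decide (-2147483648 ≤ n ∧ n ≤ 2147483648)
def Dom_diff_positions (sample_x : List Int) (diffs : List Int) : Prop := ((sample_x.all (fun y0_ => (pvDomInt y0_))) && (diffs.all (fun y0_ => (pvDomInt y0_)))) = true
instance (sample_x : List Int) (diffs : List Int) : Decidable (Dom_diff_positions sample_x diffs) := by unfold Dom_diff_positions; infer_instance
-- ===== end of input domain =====

-- B replaces A's fused seen-set loop by a different algorithm: build the flat candidate list,
-- take its distinct values, and sort them by first-occurrence index; same result, similar cost.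

-- ===== PORT A =====
-- the body of A's two 'if … not in seen' blocks, shared by both loop levels of the port
def pvStepA (st : PySem.Set Int × List Int) (y : Int) : PySem.Set Int × List Int :=
  if PySem.Set.contains st.1 y then st else (PySem.Set.add st.1 y, st.2 ++ [y])

def diff_positions (sample_x : List Int) (diffs : List Int) : List Int :=
  (sample_x.foldl (fun st x =>
      let st1 := pvStepA st x
      diffs.foldl (fun st2 d => pvStepA st2 (PySem.Int.mod (x + d) 65536)) st1)
    (PySem.Set.empty, [])).2

-- ===== PORT B =====
def diff_positions_alt (sample_x : List Int) (diffs : List Int) : List Int :=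
  let candidates := sample_x.flatMap
    (fun x => [x] ++ diffs.map (fun d => PySem.Int.mod (x + d) 65536))
  PySem.List.sorted (PySem.Set.ofList candidates)
    (fun v => ((PySem.List.index? candidates v).getD 0 : Nat)) false

-- ===== PRECONDITION & SPEC =====
def Spec_diff_positions (sample_x : List Int) (diffs : List Int) (out : List Int) : Prop := out = diff_positions_alt sample_x diffs
instance (sample_x : List Int) (diffs : List Int) (out : List Int) : Decidable (Spec_diff_positions sample_x diffs out) := by unfold Spec_diff_positions; infer_instance

-- ===== CLAIM (what is proved, stated in full; the proofs are below) =====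
def Claim_equal_diff_positions : Prop := ∀ (sample_x : List Int) (diffs : List Int), Dom_diff_positions sample_x diffs → Spec_diff_positions sample_x diffs (diff_positions sample_x diffs)

-- ===== LEMMAS AND PROOFS =====

-- A's per-x body is the fold of pvStepA over the block [x] ++ diffs.map …
theorem pvStepA_block (x : Int) (diffs : List Int) (st : PySem.Set Int × List Int) :
    diffs.foldl (fun st2 d => pvStepA st2 (PySem.Int.mod (x + d) 65536)) (pvStepA st x)
      = ([x] ++ diffs.map (fun d => PySem.Int.mod (x + d) 65536)).foldl pvStepA st := by
  simp [List.foldl_map]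

-- folding the per-block folds is folding over the flattened candidate list
theorem foldl_blocks (sample_x : List Int) (g : Int → List Int) :
    ∀ (st : PySem.Set Int × List Int),
      sample_x.foldl (fun st x => (g x).foldl pvStepA st) st
        = (sample_x.flatMap g).foldl pvStepA st := by
  induction sample_x with
  | nil => intro st; rfl
  | cons x t ih =>
      intro st
      simp only [List.foldl_cons, List.flatMap_cons, List.foldl_append]
      exact ih _

-- the two accumulators of A coincide: seen = positions, and each step is Set.add
theorem foldl_stepA_diag (cs : List Int) :
    ∀ (s : PySem.Set Int), cs.foldl pvStepA (s, s) = (cs.foldl PySem.Set.add s, cs.foldl PySem.Set.add s) := by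
  induction cs with
  | nil => intro s; rfl
  | cons y t ih =>
      intro s
      simp only [List.foldl_cons]
      by_cases h : PySem.Set.contains s y = true
      · have hstep : pvStepA (s, s) y = (s, s) := by simp only [pvStepA, h, if_true]
        have hadd : PySem.Set.add s y = s := by simp only [PySem.Set.add, h, if_true]
        rw [hstep, hadd]; exact ih s
      · have hf : PySem.Set.contains s y = false := by simpa using h
        have hadd : PySem.Set.add s y = s ++ [y] := by
          simp only [PySem.Set.add, hf, Bool.false_eq_true, if_false]
        have hstep : pvStepA (s, s) y = (s ++ [y], s ++ [y]) := by
          simp only [pvStepA, hf, Bool.false_eq_true, if_false, hadd]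
        rw [hstep, hadd]; exact ih (s ++ [y])

-- A computes the ordered dedup of the flat candidate list
theorem portA_eq_dedup (sample_x diffs : List Int) :
    diff_positions sample_x diffs
      = PySem.List.dedup (sample_x.flatMap
          (fun x => [x] ++ diffs.map (fun d => PySem.Int.mod (x + d) 65536))) := by
  unfold diff_positions
  have h1 : sample_x.foldl (fun st x =>
      let st1 := pvStepA st x
      diffs.foldl (fun st2 d => pvStepA st2 (PySem.Int.mod (x + d) 65536)) st1)
      (PySem.Set.empty, ([] : List Int))
      = (sample_x.flatMap (fun x => [x] ++ diffs.map (fun d => PySem.Int.mod (x + d) 65536))).foldl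
          pvStepA (PySem.Set.empty, []) := by
    rw [← foldl_blocks]
    simp only [pvStepA_block]
  rw [h1]
  have h2 := foldl_stepA_diag
    (sample_x.flatMap (fun x => [x] ++ diffs.map (fun d => PySem.Int.mod (x + d) 65536)))
    PySem.Set.empty
  rw [show ((PySem.Set.empty : PySem.Set Int), ([] : List Int)) = ((PySem.Set.empty : PySem.Set Int), (PySem.Set.empty : PySem.Set Int)) from rfl, h2]
  simp [PySem.List.dedup_eq_ofList, PySem.Set.ofList_eq_foldl, PySem.Set.empty]

-- ordered dedup peels its head: first occurrence first, then the dedup of the tail minus it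
theorem dedup_cons (c : Int) (cs : List Int) :
    PySem.List.dedup (c :: cs) = c :: (PySem.List.dedup cs).filter (fun v => v ≠ c) := by
  have h : PySem.Set.ofList (c :: cs) = PySem.Set.update [c] cs := by
    simp [PySem.Set.ofList_eq_foldl, PySem.Set.update, PySem.Set.add,
          PySem.Set.contains]
  simp only [PySem.List.dedup_eq_ofList, h, PySem.Set.update_eq_append_filter]
  simp [PySem.Set.contains, eq_comm]

-- the first-occurrence indices are strictly increasing along the ordered dedup
theorem dedup_index_pairwise (cs : List Int) :
    (PySem.List.dedup cs).Pairwise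
      (fun a b => ((PySem.List.index? cs a).getD 0 : Nat) < (PySem.List.index? cs b).getD 0) := by
  induction cs with
  | nil => simp [PySem.List.dedup_eq_ofList, PySem.Set.ofList, PySem.Set.empty]
  | cons c t ih =>
      rw [dedup_cons]
      refine List.Pairwise.cons ?_ ?_
      · intro b hb
        have hbne : b ≠ c := by
          have := (List.mem_filter.mp hb).2; simpa using this
        have hbt : b ∈ t := by
          have := (List.mem_filter.mp hb).1
          exact (PySem.List.mem_dedup _ _).mp this
        obtain ⟨k, hk⟩ := Option.isSome_iff_exists.mp
          ((PySem.List.index?_isSome_iff t b).mpr hbt)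
        rw [PySem.List.index?_cons_self, PySem.List.index?_cons_of_ne t (Ne.symm hbne), hk]
        simp
      · refine List.Pairwise.imp_of_mem ?_ (List.Pairwise.filter _ ih)
        intro a b ha hb hab
        have hane : a ≠ c := by have := (List.mem_filter.mp ha).2; simpa using this
        have hbne : b ≠ c := by have := (List.mem_filter.mp hb).2; simpa using this
        have hat : a ∈ t := (PySem.List.mem_dedup _ _).mp (List.mem_filter.mp ha).1
        have hbt : b ∈ t := (PySem.List.mem_dedup _ _).mp (List.mem_filter.mp hb).1
        obtain ⟨ka, hka⟩ := Option.isSome_iff_exists.mp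
          ((PySem.List.index?_isSome_iff t a).mpr hat)
        obtain ⟨kb, hkb⟩ := Option.isSome_iff_exists.mp
          ((PySem.List.index?_isSome_iff t b).mpr hbt)
        rw [PySem.List.index?_cons_of_ne t (Ne.symm hane),
            PySem.List.index?_cons_of_ne t (Ne.symm hbne), hka, hkb]
        rw [hka, hkb] at hab
        simpa using Nat.add_lt_add_right (by simpa using hab) 1

-- sorting the distinct values by first-occurrence index IS the ordered dedup
theorem sorted_by_index_eq_dedup (cs : List Int) :
    PySem.List.sorted (PySem.Set.ofList cs)
        (fun v => ((PySem.List.index? cs v).getD 0 : Nat)) false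
      = PySem.List.dedup cs := by
  apply PySem.List.sorted_eq_of_perm_of_pairwise_lt
  · rw [PySem.List.dedup_eq_ofList]
  · exact dedup_index_pairwise cs

-- ===== VERDICT (by name: the statement is the Claim_ definition above) =====
theorem diff_positions_spec : Claim_equal_diff_positions := by
  intro sample_x diffs _
  unfold Spec_diff_positions diff_positions_alt
  rw [portA_eq_dedup, sorted_by_index_eq_dedup]
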